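-- pv_equiv track=rewrite | github.com/marinakirnos/learn-python-hillel-05-05-2023 | lesson_12/hw_12/hw_10.py | create_category_brand_dict
-- ===== SOURCE A (Python) =====
-- def create_category_brand_index_key(record: dict):
--     """
--     Функция выбирает категории и бренды
--     :param record: словник, ключ -  id товар, значения под ключами - это уникальные записи
--     :return: сочитание категории и бренда
--     """
--     return tuple(sorted({'category': record['category'].lower(), 'brand': record['brand'].lower()}.items()))
--
-- def create_category_brand_dict(records: dict):
--     """
--     створює індекс по категоріям та брендам. Тобто словник, де ключі - це назва категорії/бренду, а значення -
--     це перелік унікальних айді товарів, в яких є таке значення поля категорії/бренду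
--     :param records: словник, ключ -  id товар, значения под ключами - это уникальные записи
--     :return:
--     """
--     category_brand_dict = dict()
--     for key in records.keys():
--         category_brand_index_key = create_category_brand_index_key(records[key])
--         if category_brand_index_key in category_brand_dict:
--             category_brand_dict[category_brand_index_key].append(key)
--         else:
--             category_brand_dict[category_brand_index_key] = [key]
--     return category_brand_dict
-- ===== SOURCE B (Python) =====
-- def create_category_brand_dict(records: dict):
--     # Build a flat (index_key, id) table once, then emit each distinct key
--     # (in first-encounter order) with the ids selected by a per-key scan.
--     keyed = [((('brand', rec['brand'].lower()), ('category', rec['category'].lower())), pid)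
--              for pid, rec in records.items()]
--     return {k: [pid for kk, pid in keyed if kk == k]
--             for k in dict.fromkeys(kk for kk, _ in keyed)}
-- ===== Notes on version B (the rewrite author's own statement) =====
-- stated objective: alternative
-- what changed: B replaces A's incremental hash-dict grouping (append-or-insert per record) with a flat (key,id) table built once, an ordered dedup of the keys, and a per-key filter pass; the index key is written directly in its sorted order instead of building a 2-entry dict and sorting its items.
import Mathlib
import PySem

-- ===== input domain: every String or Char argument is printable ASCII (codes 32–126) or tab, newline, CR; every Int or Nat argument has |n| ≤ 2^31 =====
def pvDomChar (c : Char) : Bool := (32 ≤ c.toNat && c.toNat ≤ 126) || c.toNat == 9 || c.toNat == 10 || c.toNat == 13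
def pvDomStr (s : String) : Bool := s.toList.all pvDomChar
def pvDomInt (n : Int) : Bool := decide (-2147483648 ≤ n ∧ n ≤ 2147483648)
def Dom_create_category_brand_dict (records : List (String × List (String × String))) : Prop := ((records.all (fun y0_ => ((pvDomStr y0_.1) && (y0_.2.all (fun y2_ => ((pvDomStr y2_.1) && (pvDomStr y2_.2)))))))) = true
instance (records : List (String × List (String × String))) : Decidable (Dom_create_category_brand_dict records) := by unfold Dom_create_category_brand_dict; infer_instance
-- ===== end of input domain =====

-- B groups by building a flat (key, id) table, deduplicating the keys in encounter order
-- and selecting each group's ids by a per-key filter pass, instead of A's incremental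
-- hash-dict grouping; equal on every input where A returns (missing 'category'/'brand'
-- keys, where A raises KeyError, are excluded by Pre_).

-- ===== PORT A =====
-- Python compares str tuples code-point lexicographically = Lean's List.Lex on .toList (exact).
def pvLexKey (p : String × String) : Lex (List Char × List Char) := toLex (p.1.toList, p.2.toList)

-- record['category'] / record['brand'] raise KeyError when absent; Pre_ excludes that, so the
-- getD default "" is never consulted on admitted inputs.
def create_category_brand_index_key (record : List (String × String)) : List (String × String) :=
  PySem.List.sorted
    (PySem.Dict.ofList
      [("category", PySem.Str.lower ((PySem.Dict.ofList record).getD "category" "")),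
       ("brand", PySem.Str.lower ((PySem.Dict.ofList record).getD "brand" ""))]).items
    pvLexKey

def create_category_brand_dict (records : List (String × List (String × String))) : List (List (String × String) × List String) :=
  let d := PySem.Dict.ofList records
  (List.foldl (fun acc key =>
      let ik := create_category_brand_index_key (d.getD key [])
      if acc.contains ik then acc.modify ik [] (fun v => v ++ [key])
      else acc.insert ik [key])
    PySem.Dict.empty d.keys).items

-- ===== PORT B =====
def pvAltIndexKey (record : List (String × String)) : List (String × String) :=
  [("brand", PySem.Str.lower ((PySem.Dict.ofList record).getD "brand" "")),
   ("category", PySem.Str.lower ((PySem.Dict.ofList record).getD "category" ""))]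

def create_category_brand_dict_alt (records : List (String × List (String × String))) : List (List (String × String) × List String) :=
  let keyed := (PySem.Dict.ofList records).items.map (fun p => (pvAltIndexKey p.2, p.1))
  (PySem.List.dedup (keyed.map (fun q => q.1))).map
    (fun k => (k, (keyed.filter (fun q => q.1 == k)).map (fun q => q.2)))

-- ===== PRECONDITION & SPEC =====
-- Pre_ excludes exactly the inputs where Python A raises KeyError: some effective record
-- (after dict construction) lacks a 'category' or 'brand' key.
def Pre_create_category_brand_dict (records : List (String × List (String × String))) : Prop :=
  ∀ p ∈ (PySem.Dict.ofList records).items,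
    (PySem.Dict.ofList p.2).contains "category" = true ∧ (PySem.Dict.ofList p.2).contains "brand" = true
instance (records : List (String × List (String × String))) : Decidable (Pre_create_category_brand_dict records) := by unfold Pre_create_category_brand_dict; infer_instance

def pvWitness_create_category_brand_dict : (List (String × List (String × String))) :=
  [("p1", [("category", "Shoes"), ("brand", "Nike")]), ("p2", [("category", "shoes"), ("brand", "NIKE")])]

def Spec_create_category_brand_dict (records : List (String × List (String × String))) (out : List (List (String × String) × List String)) : Prop := out = create_category_brand_dict_alt records
instance (records : List (String × List (String × String))) (out : List (List (String × String) × List String)) : Decidable (Spec_create_category_brand_dict records out) := by unfold Spec_create_category_brand_dict; infer_instance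

-- ===== CLAIM (what is proved, stated in full; the proofs are below) =====
def Claim_equal_create_category_brand_dict : Prop := ∀ (records : List (String × List (String × String))), Dom_create_category_brand_dict records → Pre_create_category_brand_dict records → Spec_create_category_brand_dict records (create_category_brand_dict records)

-- ===== LEMMAS AND PROOFS =====

theorem pv_sorted_pair (b c : String) :
    PySem.List.sorted [(("category" : String), c), ("brand", b)] pvLexKey = [("brand", b), ("category", c)] := by
  have h : pvLexKey ("brand", b) < pvLexKey ("category", c) := by
    unfold pvLexKey
    dsimp only
    rw [Prod.Lex.lt_iff]; left
    change ['b','r','a','n','d'] < ['c','a','t','e','g','o','r','y']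
    decide

  simp [PySem.List.sorted, PySem.List.insertBy, h]

theorem pv_key_eq (rec : List (String × String)) :
    create_category_brand_index_key rec = pvAltIndexKey rec := by
  unfold create_category_brand_index_key pvAltIndexKey
  have hitems : ∀ (x y : String),
      (PySem.Dict.ofList [(("category" : String), x), ("brand", y)]).items = [("category", x), ("brand", y)] := by
    intro x y
    simp [PySem.Dict.ofList, PySem.Dict.update, PySem.Dict.insert, PySem.Dict.empty, PySem.Dict.contains]
  rw [hitems, pv_sorted_pair]

theorem pv_step_eq (acc : PySem.Dict (List (String × String)) (List String))
    (ik : List (String × String)) (k : String) :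
    (if acc.contains ik then acc.modify ik [] (fun v => v ++ [k]) else acc.insert ik [k]) =
      acc.modify ik [] (fun v => v ++ [k]) := by
  by_cases h : acc.contains ik = true
  · simp [h]
  · simp only [Bool.not_eq_true] at h
    simp [h, PySem.Dict.modify, PySem.Dict.getD_of_not_contains acc _ h]

theorem pv_main (records : List (String × List (String × String))) :
    create_category_brand_dict records = create_category_brand_dict_alt records := by
  unfold create_category_brand_dict create_category_brand_dict_alt
  simp only []
  set d := PySem.Dict.ofList records with hd
  set kf : String → List (String × String) := fun k => create_category_brand_index_key (d.getD k []) with hkf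
  set l : List (List (String × String) × String) := d.keys.map (fun k => (kf k, k)) with hl
  -- A's fold = pure modify fold over the pair list l
  have hA : (List.foldl (fun acc key =>
      let ik := create_category_brand_index_key (d.getD key [])
      if acc.contains ik then acc.modify ik [] (fun v => v ++ [key])
      else acc.insert ik [key]) PySem.Dict.empty d.keys) =
      List.foldl (fun acc p => acc.modify p.1 [] (fun v => v ++ [p.2])) PySem.Dict.empty l := by
    rw [hl, List.foldl_map]
    have hfun : (fun (acc : PySem.Dict (List (String × String)) (List String)) key =>
        let ik := create_category_brand_index_key (d.getD key [])
        if acc.contains ik then acc.modify ik [] (fun v => v ++ [key])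
        else acc.insert ik [key]) =
        (fun acc k => acc.modify (kf k) [] (fun v => v ++ [k])) := by
      funext acc k
      simpa [hkf] using pv_step_eq acc (kf k) k
    rw [hfun]
  rw [hA]
  set R := List.foldl (fun acc p => acc.modify p.1 [] (fun v => v ++ [p.2])) PySem.Dict.empty l with hR
  have hkeys : R.keys = PySem.Set.ofList (l.map (fun q => q.1)) := by
    rw [hR]
    have := PySem.Dict.keys_foldl_modify_key l (fun p => p.1) ([] : List String)
      (fun _ p => (fun v => v ++ [p.2])) PySem.Dict.empty
    simpa [PySem.Set.update, PySem.Set.ofList, PySem.Dict.empty, PySem.Dict.keys] using this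
  have hnodupR : R.keys.Nodup := by
    rw [hR]
    exact PySem.Dict.nodup_keys_foldl_modify_key l (fun p => p.1) ([] : List String)
      (fun _ p => (fun v => v ++ [p.2])) PySem.Dict.empty (by simp [PySem.Dict.empty, PySem.Dict.keys])
  have hgetD : ∀ k, R.getD k [] = (l.filter (fun q => q.1 == k)).map (fun q => q.2) := by
    intro k
    rw [hR]
    have := PySem.Dict.getD_foldl_modify_append l PySem.Dict.empty k
    simpa [PySem.Dict.getD_of_not_contains (PySem.Dict.empty) ([] : List String)
      (by simp [PySem.Dict.empty, PySem.Dict.contains])] using this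
  -- left side: items of R
  rw [PySem.Dict.items_eq_map_keys R hnodupR ([] : List String), hkeys]
  -- right side: keyed = l
  have hkeyed : d.items.map (fun p => (pvAltIndexKey p.2, p.1)) = l := by
    rw [PySem.Dict.items_eq_map_keys d (PySem.Dict.nodup_keys_ofList records) ([] : List (String × String)),
      List.map_map, hl]
    apply List.map_congr_left
    intro k _
    simp [Function.comp, hkf, pv_key_eq]
  rw [hkeyed]
  have hdedup : PySem.List.dedup (l.map (fun q => q.1)) = PySem.Set.ofList (l.map (fun q => q.1)) := rfl
  rw [hdedup]
  apply List.map_congr_left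
  intro k _
  rw [hgetD]

-- ===== VERDICT (by name: the statement is the Claim_ definition above) =====
theorem create_category_brand_dict_spec : Claim_equal_create_category_brand_dict := by
  intro records _ _
  unfold Spec_create_category_brand_dict
  exact pv_main records
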